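-- pv_equiv track=rewrite | github.com/LIMr1209/test | c/1.py | uv_compare
-- ===== SOURCE A (Python) =====
-- def uv_compare(data1, data2):
--     uv_data = {}
--
--     for index1, i in enumerate(data1):
--         for index2, j in enumerate(data2):
--             if i == j:
--                 if index1 in uv_data:
--                     uv_data[index1].append(index2)
--                 else:
--                     uv_data[index1] = [index2]
--     return uv_data
-- ===== SOURCE B (Python) =====
-- def uv_compare(data1, data2):
--     index_map = {}
--     for index2, j in enumerate(data2):
--         index_map.setdefault(j, []).append(index2)
--     uv_data = {}
--     for index1, i in enumerate(data1):
--         if i in index_map: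
--             uv_data[index1] = list(index_map[i])
--     return uv_data
-- ===== Notes on version B (the rewrite author's own statement) =====
-- stated objective: faster
-- what changed: Replaces A's nested scan of data2 for every element of data1 by a dict mapping each data2 value to its index list, built in one pass, followed by a single lookup pass over data1.
import Mathlib
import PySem

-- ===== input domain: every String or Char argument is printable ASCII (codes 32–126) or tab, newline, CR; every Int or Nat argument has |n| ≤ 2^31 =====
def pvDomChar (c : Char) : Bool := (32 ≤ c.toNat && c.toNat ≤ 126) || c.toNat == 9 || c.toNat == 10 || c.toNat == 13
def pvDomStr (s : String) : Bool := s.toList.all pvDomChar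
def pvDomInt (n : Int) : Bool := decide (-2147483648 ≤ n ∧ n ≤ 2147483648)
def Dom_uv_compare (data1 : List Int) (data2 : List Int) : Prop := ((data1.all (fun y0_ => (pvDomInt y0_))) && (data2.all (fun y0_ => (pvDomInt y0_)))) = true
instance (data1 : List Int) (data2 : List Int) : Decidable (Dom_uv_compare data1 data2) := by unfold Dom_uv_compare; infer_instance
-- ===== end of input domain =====

-- B replaces A's O(n*m) nested scan by a hash index of data2 (value -> index list) and one pass over data1 (objective: faster, asymptotic).

-- ===== PORT A =====
-- inner-loop body of A: one step of 'for index2, j in enumerate(data2)' for the fixed (index1, i) = (k, v)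
def uvInnerStep (k v : Int) (uv : PySem.Dict Int (List Int)) (p : Int × Int) : PySem.Dict Int (List Int) :=
  if v == p.2 then
    (if uv.contains k then uv.modify k [] (fun l => l ++ [p.1]) else uv.insert k [p.1])
  else uv

def uv_compare (data1 : List Int) (data2 : List Int) : List (Int × List Int) :=
  ((PySem.List.enumerate data1 0).foldl
    (fun uv q => (PySem.List.enumerate data2 0).foldl (uvInnerStep q.1 q.2) uv)
    PySem.Dict.empty).items

-- ===== PORT B =====
-- index_map.setdefault(j, []).append(index2)  ==  modify j [] (· ++ [index2])
def uvBuildIndex (data2 : List Int) : PySem.Dict Int (List Int) :=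
  (PySem.List.enumerate data2 0).foldl (fun d p => d.modify p.2 [] (fun l => l ++ [p.1])) PySem.Dict.empty

def uv_compare_alt (data1 : List Int) (data2 : List Int) : List (Int × List Int) :=
  let indexMap := uvBuildIndex data2
  ((PySem.List.enumerate data1 0).foldl
    (fun uv p => if indexMap.contains p.2 then uv.insert p.1 (indexMap.getD p.2 []) else uv)
    (PySem.Dict.empty : PySem.Dict Int (List Int))).items

-- ===== PRECONDITION & SPEC =====
def Spec_uv_compare (data1 : List Int) (data2 : List Int) (out : List (Int × List Int)) : Prop := out = uv_compare_alt data1 data2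
instance (data1 : List Int) (data2 : List Int) (out : List (Int × List Int)) : Decidable (Spec_uv_compare data1 data2 out) := by unfold Spec_uv_compare; infer_instance

-- ===== CLAIM (what is proved, stated in full; the proofs are below) =====
def Claim_equal_uv_compare : Prop := ∀ (data1 : List Int) (data2 : List Int), Dom_uv_compare data1 data2 → Spec_uv_compare data1 data2 (uv_compare data1 data2)

-- ===== LEMMAS AND PROOFS =====

-- indices of data2 holding the value v, in order (what A accumulates for one index1 with data1[index1] = v)
def uvM (data2 : List Int) (v : Int) : List Int :=
  ((PySem.List.enumerate data2 0).filter (fun p => v == p.2)).map (·.1)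

theorem uv_contains_mk (base : List (Int × List Int)) (k : Int) (h : ∀ p ∈ base, p.1 ≠ k) :
    (PySem.Dict.mk base).contains k = false := by
  simp [PySem.Dict.contains, List.any_eq_false]
  exact fun a b hab => h (a, b) hab

theorem uv_getD_last (base : List (Int × List Int)) (k : Int) (acc d0 : List Int)
    (h : ∀ p ∈ base, p.1 ≠ k) :
    (PySem.Dict.mk (base ++ [(k, acc)])).getD k d0 = acc := by
  induction base with
  | nil => simp [PySem.Dict.getD, PySem.Dict.get?]
  | cons p base ih =>
    obtain ⟨a, b⟩ := p
    have hp : a ≠ k := h (a, b) (by simp)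
    have := ih (fun q hq => h q (by simp [hq]))
    simp only [PySem.Dict.getD] at this ⊢
    rw [List.cons_append, PySem.Dict.get?_mk_cons, if_neg (by simpa using hp)]
    exact this

theorem uv_insert_last (base : List (Int × List Int)) (k : Int) (acc v : List Int)
    (h : ∀ p ∈ base, p.1 ≠ k) :
    (PySem.Dict.mk (base ++ [(k, acc)])).insert k v = PySem.Dict.mk (base ++ [(k, v)]) := by
  have hc : (PySem.Dict.mk (base ++ [(k, acc)])).contains k = true := by
    simp [PySem.Dict.contains]
  apply PySem.Dict.ext
  simp only [PySem.Dict.insert, hc, if_true]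
  show List.map _ (base ++ [(k, acc)]) = base ++ [(k, v)]
  rw [List.map_append]
  congr 1
  · have : ∀ p ∈ base, (if (p.1 == k) = true then ((k, v) : Int × List Int) else p) = id p := by
      intro p hp; simp [h p hp]
    rw [List.map_congr_left this, List.map_id]
  · simp

theorem uv_insert_fresh (base : List (Int × List Int)) (k : Int) (v : List Int)
    (h : ∀ p ∈ base, p.1 ≠ k) :
    (PySem.Dict.mk base).insert k v = PySem.Dict.mk (base ++ [(k, v)]) := by
  apply PySem.Dict.ext
  exact PySem.Dict.items_insert_of_not_contains _ _ (uv_contains_mk base k h)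

-- the freshness hypothesis survives appending the just-finished key (distinct by Nodup)
theorem uv_fresh_extend (l1 : List (Int × Int)) (base : List (Int × List Int)) (q : Int × Int)
    (X : List Int) (h : ∀ q' ∈ q :: l1, ∀ p ∈ base, p.1 ≠ q'.1)
    (hnd : ((q :: l1).map (·.1)).Nodup) :
    ∀ q' ∈ l1, ∀ p ∈ base ++ [(q.1, X)], p.1 ≠ q'.1 := by
  intro q' hq' p hp
  rcases List.mem_append.1 hp with hp | hp
  · exact h q' (by simp [hq']) p hp
  · have hpq : p = (q.1, X) := by simpa using hp
    subst hpq
    simp only [List.map_cons, List.nodup_cons] at hnd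
    intro hEq
    exact hnd.1 (hEq ▸ List.mem_map_of_mem hq')

theorem uv_inner_present (v k : Int) (l : List (Int × Int)) (base : List (Int × List Int)) (acc : List Int)
    (h : ∀ p ∈ base, p.1 ≠ k) :
    l.foldl (uvInnerStep k v) (PySem.Dict.mk (base ++ [(k, acc)]))
      = PySem.Dict.mk (base ++ [(k, acc ++ (l.filter (fun p => v == p.2)).map (·.1))]) := by
  induction l generalizing acc with
  | nil => simp
  | cons p l ih =>
    by_cases hv : v == p.2
    · have hc : (PySem.Dict.mk (base ++ [(k, acc)])).contains k = true := by
        simp [PySem.Dict.contains]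
      rw [List.foldl_cons]
      have hstep : uvInnerStep k v (PySem.Dict.mk (base ++ [(k, acc)])) p
          = PySem.Dict.mk (base ++ [(k, acc ++ [p.1])]) := by
        simp only [uvInnerStep, hv, if_true, hc, PySem.Dict.modify]
        rw [uv_getD_last base k acc [] h, uv_insert_last base k acc _ h]
      rw [hstep, ih (acc ++ [p.1])]
      simp [hv]
    · rw [List.foldl_cons]
      have hstep : uvInnerStep k v (PySem.Dict.mk (base ++ [(k, acc)])) p
          = PySem.Dict.mk (base ++ [(k, acc)]) := by
        simp [uvInnerStep, hv]
      have hv' : (v == p.2) = false := by simpa using hv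
      rw [hstep, ih acc]
      simp [hv']

theorem uv_inner_fresh (v k : Int) (l : List (Int × Int)) (base : List (Int × List Int))
    (h : ∀ p ∈ base, p.1 ≠ k) :
    l.foldl (uvInnerStep k v) (PySem.Dict.mk base)
      = if (l.filter (fun p => v == p.2)) = [] then PySem.Dict.mk base
        else PySem.Dict.mk (base ++ [(k, (l.filter (fun p => v == p.2)).map (·.1))]) := by
  induction l with
  | nil => simp
  | cons p l ih =>
    by_cases hv : v == p.2
    · rw [List.foldl_cons]
      have hstep : uvInnerStep k v (PySem.Dict.mk base) p
          = PySem.Dict.mk (base ++ [(k, [p.1])]) := by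
        simp only [uvInnerStep, hv, if_true, uv_contains_mk base k h]
        exact uv_insert_fresh base k [p.1] h
      rw [hstep, uv_inner_present v k l base [p.1] h]
      simp [hv]
    · rw [List.foldl_cons]
      have hstep : uvInnerStep k v (PySem.Dict.mk base) p = PySem.Dict.mk base := by
        simp [uvInnerStep, hv]
      have hv' : (v == p.2) = false := by simpa using hv
      have hfc : List.filter (fun p => v == p.2) (p :: l) = List.filter (fun p => v == p.2) l := by
        rw [List.filter_cons, hv']; simp
      rw [hstep, ih, hfc]

theorem uv_outer (data2 : List Int) (l1 : List (Int × Int)) (base : List (Int × List Int))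
    (h : ∀ q ∈ l1, ∀ p ∈ base, p.1 ≠ q.1) (hnd : (l1.map (·.1)).Nodup) :
    (l1.foldl (fun uv q => (PySem.List.enumerate data2 0).foldl (uvInnerStep q.1 q.2) uv)
      (PySem.Dict.mk base)).items
      = base ++ l1.flatMap (fun q => if uvM data2 q.2 = [] then [] else [(q.1, uvM data2 q.2)]) := by
  induction l1 generalizing base with
  | nil => simp
  | cons q l1 ih =>
    have hq : ∀ p ∈ base, p.1 ≠ q.1 := h q (by simp)
    rw [List.foldl_cons, uv_inner_fresh q.2 q.1 _ base hq]
    by_cases hm : ((PySem.List.enumerate data2 0).filter (fun p => q.2 == p.2)) = []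
    · rw [if_pos hm, ih base (fun q' hq' => h q' (by simp [hq'])) (by simpa using hnd.of_cons)]
      have hM0 : uvM data2 q.2 = [] := by simp [uvM, hm]
      rw [List.flatMap_cons, if_pos hM0, List.nil_append]
    · rw [if_neg hm,
        ih _ (uv_fresh_extend l1 base q _ h hnd) (by simpa using hnd.of_cons),
        List.flatMap_cons, if_neg (by simp [uvM, hm])]
      simp [uvM]

theorem uv_result_fold (idx : PySem.Dict Int (List Int)) (l1 : List (Int × Int)) (base : List (Int × List Int))
    (h : ∀ q ∈ l1, ∀ p ∈ base, p.1 ≠ q.1) (hnd : (l1.map (·.1)).Nodup) :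
    (l1.foldl (fun uv p => if idx.contains p.2 then uv.insert p.1 (idx.getD p.2 []) else uv)
      (PySem.Dict.mk base)).items
      = base ++ l1.flatMap (fun p => if idx.contains p.2 then [(p.1, idx.getD p.2 [])] else []) := by
  induction l1 generalizing base with
  | nil => simp
  | cons q l1 ih =>
    have hq : ∀ p ∈ base, p.1 ≠ q.1 := h q (by simp)
    rw [List.foldl_cons]
    by_cases hc : idx.contains q.2
    · rw [if_pos hc, uv_insert_fresh base q.1 _ hq,
        ih _ (uv_fresh_extend l1 base q _ h hnd) (by simpa using hnd.of_cons),
        List.flatMap_cons, if_pos hc]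
      simp
    · rw [if_neg hc, ih base (fun q' hq' => h q' (by simp [hq'])) (by simpa using hnd.of_cons),
        List.flatMap_cons, if_neg hc, List.nil_append]

theorem uv_index_getD (data2 : List Int) (v : Int) :
    (uvBuildIndex data2).getD v [] = uvM data2 v := by
  unfold uvBuildIndex
  have hswap : (PySem.List.enumerate data2 0).foldl
      (fun d p => d.modify p.2 [] (fun l => l ++ [p.1])) PySem.Dict.empty
      = ((PySem.List.enumerate data2 0).map (fun p => (p.2, p.1))).foldl
          (fun d p => d.modify p.1 [] (fun l => l ++ [p.2])) PySem.Dict.empty := by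
    rw [List.foldl_map]
  rw [hswap, PySem.Dict.getD_foldl_modify_append]
  simp only [PySem.Dict.getD_empty, List.nil_append, uvM, List.filter_map, List.map_map]
  congr 1
  apply List.filter_congr
  intro p hp
  simp [BEq.comm]

theorem uv_index_contains (data2 : List Int) (v : Int) :
    (uvBuildIndex data2).contains v = decide (v ∈ data2) := by
  rw [Bool.eq_iff_iff, decide_eq_true_iff, PySem.Dict.contains_iff_mem_keys]
  unfold uvBuildIndex
  rw [PySem.Dict.keys_foldl_modify_key (PySem.List.enumerate data2 0) (fun p => p.2) []
    (fun d x => fun l => l ++ [x.1]) PySem.Dict.empty]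
  rw [show (PySem.Dict.empty : PySem.Dict Int (List Int)).keys = ([] : List Int) from rfl,
    PySem.Set.update_nil_left, PySem.List.map_snd_enumerate]
  exact PySem.Set.mem_ofList data2 v

theorem uv_M_nil_iff (data2 : List Int) (v : Int) :
    uvM data2 v = [] ↔ v ∉ data2 := by
  have hmem : v ∈ data2 ↔ ∃ p ∈ PySem.List.enumerate data2 0, p.2 = v := by
    conv_lhs => rw [← PySem.List.map_snd_enumerate data2 0]
    exact List.mem_map
  simp only [uvM, List.map_eq_nil_iff, List.filter_eq_nil_iff, hmem]
  constructor
  · rintro h ⟨p, hp, hv⟩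
    exact h p hp (by simp [hv])
  · intro h p hp hb
    exact h ⟨p, hp, ((by simpa using hb : v = p.2)).symm⟩

theorem uv_enum_fst_nodup (xs : List Int) : ((PySem.List.enumerate xs 0).map (·.1)).Nodup := by
  have := PySem.List.pairwise_lt_enumerate xs 0
  exact (List.pairwise_map.2 this).imp fun hlt => ne_of_lt hlt

-- ===== VERDICT (by name: the statement is the Claim_ definition above) =====
theorem uv_compare_spec : Claim_equal_uv_compare := by
  intro data1 data2 _
  unfold Spec_uv_compare uv_compare
  show _ = ((PySem.List.enumerate data1 0).foldl
    (fun uv p => if (uvBuildIndex data2).contains p.2 then uv.insert p.1 ((uvBuildIndex data2).getD p.2 []) else uv)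
    (PySem.Dict.empty : PySem.Dict Int (List Int))).items
  have hnd := uv_enum_fst_nodup data1
  have hempty : (PySem.Dict.empty : PySem.Dict Int (List Int)) = PySem.Dict.mk [] := rfl
  rw [hempty, uv_outer data2 _ [] (by simp) hnd, uv_result_fold _ _ [] (by simp) hnd]
  simp only [List.nil_append]
  have hfun : ∀ q ∈ PySem.List.enumerate data1 0,
      (if uvM data2 q.2 = [] then ([] : List (Int × List Int)) else [(q.1, uvM data2 q.2)])
        = (if (uvBuildIndex data2).contains q.2 then [(q.1, (uvBuildIndex data2).getD q.2 [])] else []) := by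
    intro q _
    by_cases hmem : q.2 ∈ data2
    · rw [if_neg (fun h0 => ((uv_M_nil_iff data2 q.2).1 h0) hmem),
        if_pos (by rw [uv_index_contains]; simpa), uv_index_getD]
    · rw [if_pos ((uv_M_nil_iff data2 q.2).2 hmem),
        if_neg (by rw [uv_index_contains]; simpa)]
  rw [List.flatMap_def, List.flatMap_def, List.map_congr_left hfun]
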